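-- pv_equiv track=rewrite | github.com/pypi-data/pypi-mirror-338 | packages/nace/nace-0.0.29.tar.gz/nace-0.0.29/nace/world_module.py | extract_agent_location_from_board
-- ===== SOURCE A (Python) =====
-- def extract_agent_location_from_board(board, location_indicator_char='x'):
--     """
--     Extrat the location of an item on the board. Assumes uniqueness
--     @param board:
--     @param location_indicator_char:
--     @return:
--     """
--     location_row = 0
--     location_column = 0
--     # check the sizes are correct, and see where location marker is
--     for row_number in range(len(board)):
--         if row_number > 0:
--             assert len(board[0]) == len(board[row_number])
--         # check for location marker
--         if location_indicator_char in board[row_number]: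
--             location_row = row_number
--             location_column = board[row_number].index(location_indicator_char)
--     return (location_column, location_row)
-- ===== SOURCE B (Python) =====
-- def extract_agent_location_from_board(board, location_indicator_char='x'):
--     # validate all row lengths up front (empty board: nothing checked, no board[0] access)
--     assert all(len(board[0]) == len(board[r]) for r in range(1, len(board)))
--     # scan from the last row: the first hit from the end is A's "last match"
--     for row_number in reversed(range(len(board))):
--         column = board[row_number].find(location_indicator_char)
--         if column != -1:
--             return (column, row_number)
--     return (0, 0)
-- ===== Notes on version B (the rewrite author's own statement) =====
-- stated objective: alternative
-- what changed: Validation is hoisted into one all() check, and instead of a forward scan that keeps overwriting the last matching position, B scans rows back-to-front and returns immediately at the first row containing the marker.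
import Mathlib
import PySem

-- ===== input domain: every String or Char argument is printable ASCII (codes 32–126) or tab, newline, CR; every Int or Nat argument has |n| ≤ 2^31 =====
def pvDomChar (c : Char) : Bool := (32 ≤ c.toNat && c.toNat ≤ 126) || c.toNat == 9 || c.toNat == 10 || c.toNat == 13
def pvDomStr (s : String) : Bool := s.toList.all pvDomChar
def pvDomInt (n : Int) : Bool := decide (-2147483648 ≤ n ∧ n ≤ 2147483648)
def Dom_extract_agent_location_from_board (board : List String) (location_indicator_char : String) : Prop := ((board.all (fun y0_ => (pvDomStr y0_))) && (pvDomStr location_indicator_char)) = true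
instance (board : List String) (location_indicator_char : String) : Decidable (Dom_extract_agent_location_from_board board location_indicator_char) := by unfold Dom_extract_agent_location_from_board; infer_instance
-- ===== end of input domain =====

-- B hoists the row-length validation and scans rows from the end with an early
-- return instead of A's forward scan that overwrites the last match (alternative
-- decomposition, same cost). Equal-length rows are required by Pre_ because A's
-- assert raises AssertionError otherwise.


-- ===== PORT A =====
-- forward loop over row numbers; state (location_column, location_row), overwritten
-- at every row containing the marker.  The assert's failure case (unequal row
-- lengths) is excluded by Pre_ below.
def extract_agent_location_from_board (board : List String) (location_indicator_char : String) : Int × Int :=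
  (PySem.List.pyRange 0 (board.length : Int) 1).foldl
    (fun (st : Int × Int) row_number =>
      let row := PySem.List.pyGetD board row_number ""
      if PySem.Str.isIn location_indicator_char row then
        (PySem.Str.find row location_indicator_char, row_number)
      else st)
    (0, 0)

-- ===== PORT B =====
-- Source B's loop: scan the reversed index list, return at the first row whose
-- find(...) is not -1.
def pvAltGo (board : List String) (location_indicator_char : String) : List Int → Int × Int
  | [] => (0, 0)
  | row_number :: rest =>
    let column := PySem.Str.find (PySem.List.pyGetD board row_number "") location_indicator_char
    if column ≠ -1 then (column, row_number)
    else pvAltGo board location_indicator_char rest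

def extract_agent_location_from_board_alt (board : List String) (location_indicator_char : String) : Int × Int :=
  pvAltGo board location_indicator_char ((PySem.List.pyRange 0 (board.length : Int) 1).reverse)

-- ===== PRECONDITION & SPEC =====
-- A (and B) raise AssertionError when some row's length differs from row 0's;
-- Pre_ admits exactly the boards whose rows all have equal length.
def Pre_extract_agent_location_from_board (board : List String) (location_indicator_char : String) : Prop :=
  ∀ s ∈ board, PySem.Str.len s = PySem.Str.len (board.headD "")
instance (board : List String) (location_indicator_char : String) : Decidable (Pre_extract_agent_location_from_board board location_indicator_char) := by unfold Pre_extract_agent_location_from_board; infer_instance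
def pvWitness_extract_agent_location_from_board : List String × String := (["ab", "xb"], "x")

def Spec_extract_agent_location_from_board (board : List String) (location_indicator_char : String) (out : Int × Int) : Prop := out = extract_agent_location_from_board_alt board location_indicator_char
instance (board : List String) (location_indicator_char : String) (out : Int × Int) : Decidable (Spec_extract_agent_location_from_board board location_indicator_char out) := by unfold Spec_extract_agent_location_from_board; infer_instance

-- ===== CLAIM (what is proved, stated in full; the proofs are below) =====
def Claim_equal_extract_agent_location_from_board : Prop := ∀ (board : List String) (location_indicator_char : String), Dom_extract_agent_location_from_board board location_indicator_char → Pre_extract_agent_location_from_board board location_indicator_char → Spec_extract_agent_location_from_board board location_indicator_char (extract_agent_location_from_board board location_indicator_char)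

-- ===== LEMMAS AND PROOFS =====

-- pvAltGo with an arbitrary fall-through value (its "no match" result made a parameter)
def pvG (board : List String) (lic : String) (init : Int × Int) : List Int → Int × Int
  | [] => init
  | r :: rest =>
    let column := PySem.Str.find (PySem.List.pyGetD board r "") lic
    if column ≠ -1 then (column, r) else pvG board lic init rest

lemma pvAltGo_eq_pvG (board : List String) (lic : String) (l : List Int) :
    pvAltGo board lic l = pvG board lic (0, 0) l := by
  induction l with
  | nil => rfl
  | cons r rest ih => simp [pvAltGo, pvG, ih]

lemma pvG_append (board : List String) (lic : String) (init : Int × Int)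
    (xs ys : List Int) :
    pvG board lic init (xs ++ ys) = pvG board lic (pvG board lic init ys) xs := by
  induction xs with
  | nil => rfl
  | cons r rest ih => simp [pvG, ih]

-- A's loop body equals processing one index with pvG: same branch (isIn ↔ find ≠ -1), same update
lemma pvStep_eq (board : List String) (lic : String) (init : Int × Int) (r : Int) :
    (let row := PySem.List.pyGetD board r "";
     if PySem.Str.isIn lic row then (PySem.Str.find row lic, r) else init)
    = pvG board lic init [r] := by
  simp only [pvG]
  by_cases h : lic.toList <:+: (PySem.List.pyGetD board r "").toList
  · rw [if_pos ((PySem.Str.isIn_iff_infix _ _).mpr h),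
      if_pos ((PySem.Str.find_ne_neg_one_iff _ _).mpr h)]
  · rw [if_neg (fun hc => h ((PySem.Str.isIn_iff_infix _ _).mp hc)),
      if_neg (fun hc => h ((PySem.Str.find_ne_neg_one_iff _ _).mp hc))]

lemma pvFoldl_eq_pvG (board : List String) (lic : String) :
    ∀ (l : List Int) (init : Int × Int),
      l.foldl (fun (st : Int × Int) row_number =>
        let row := PySem.List.pyGetD board row_number ""
        if PySem.Str.isIn lic row then (PySem.Str.find row lic, row_number) else st) init
      = pvG board lic init l.reverse := by
  intro l
  induction l with
  | nil => intro init; rfl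
  | cons r rest ih =>
    intro init
    rw [List.foldl_cons, ih, List.reverse_cons, pvG_append, ← pvStep_eq]

-- ===== VERDICT (by name: the statement is the Claim_ definition above) =====
theorem extract_agent_location_from_board_spec : Claim_equal_extract_agent_location_from_board := by
  intro board lic _ _
  unfold Spec_extract_agent_location_from_board extract_agent_location_from_board
    extract_agent_location_from_board_alt
  rw [pvFoldl_eq_pvG, pvAltGo_eq_pvG]
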